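-- pv_equiv track=rewrite | github.com/understand-jin/Stacking_container | MIP_data.py | generate_positions_diagonal_pattern
-- ===== SOURCE A (Python) =====
-- def generate_positions_diagonal_pattern(num_stacks, num_tiers):
--     positions = []
--     for start in range(num_tiers):
--         x, y = 0, start
--         while y >= 0 and x < num_stacks:
--             positions.append((x, y))
--             x += 1
--             y -= 1
--     for start in range(1, num_stacks):
--         x, y = start, num_tiers - 1
--         while x < num_stacks and y >= 0:
--             positions.append((x, y))
--             x += 1
--             y -= 1
--     return positions
-- ===== SOURCE B (Python) =====
-- def generate_positions_diagonal_pattern(num_stacks, num_tiers):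
--     # Build the whole grid row-major, then sort it by the scalar diagonal rank
--     # (x+y)*num_stacks + x, i.e. diagonal sum first, column second.
--     positions = [(x, y) for x in range(num_stacks) for y in range(num_tiers)]
--     positions.sort(key=lambda p: (p[0] + p[1]) * num_stacks + p[0])
--     return positions
-- ===== Notes on version B (the rewrite author's own statement) =====
-- stated objective: alternative
-- what changed: Instead of walking each diagonal with seeded while-loops, B materialises the full grid row-major and sorts it once by the scalar diagonal rank (x+y)*num_stacks + x, which orders cells by anti-diagonal sum and then by column.
import Mathlib
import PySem

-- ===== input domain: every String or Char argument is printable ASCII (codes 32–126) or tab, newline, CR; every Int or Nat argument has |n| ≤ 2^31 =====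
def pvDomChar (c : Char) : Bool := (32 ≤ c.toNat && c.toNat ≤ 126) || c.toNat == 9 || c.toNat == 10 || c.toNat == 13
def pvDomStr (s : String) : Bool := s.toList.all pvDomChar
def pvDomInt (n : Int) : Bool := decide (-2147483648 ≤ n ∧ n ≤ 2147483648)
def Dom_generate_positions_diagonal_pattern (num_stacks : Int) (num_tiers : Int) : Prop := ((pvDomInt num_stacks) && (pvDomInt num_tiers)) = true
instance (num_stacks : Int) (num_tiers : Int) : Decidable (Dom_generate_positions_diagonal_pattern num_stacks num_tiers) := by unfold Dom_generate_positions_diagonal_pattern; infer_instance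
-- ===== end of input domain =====

-- B builds the whole grid row-major and sorts it once by the scalar diagonal rank
-- (x+y)*num_stacks + x, instead of A's two families of seeded while-loop diagonal walks
-- (objective: alternative algorithm, same result).

-- ===== PORT A =====
-- the inner 'while y >= 0 and x < num_stacks: append((x,y)); x += 1; y -= 1' loop
def whileDiag (num_stacks : Int) (x : Int) (y : Int) : List (Int × Int) :=
  if 0 ≤ y ∧ x < num_stacks then (x, y) :: whileDiag num_stacks (x + 1) (y - 1) else []
termination_by (y + 1).toNat
decreasing_by omega

def generate_positions_diagonal_pattern (num_stacks : Int) (num_tiers : Int) : List (Int × Int) :=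
  let positions := (PySem.List.pyRange 0 num_tiers 1).foldl
    (fun acc start => acc ++ whileDiag num_stacks 0 start) []
  (PySem.List.pyRange 1 num_stacks 1).foldl
    (fun acc start => acc ++ whileDiag num_stacks start (num_tiers - 1)) positions

-- ===== PORT B =====
def generate_positions_diagonal_pattern_alt (num_stacks : Int) (num_tiers : Int) : List (Int × Int) :=
  let cells := (PySem.List.pyRange 0 num_stacks 1).flatMap
    (fun x => (PySem.List.pyRange 0 num_tiers 1).map (fun y => (x, y)))
  PySem.List.sorted cells (fun p => (p.1 + p.2) * num_stacks + p.1) false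

-- ===== PRECONDITION & SPEC =====
def Spec_generate_positions_diagonal_pattern (num_stacks : Int) (num_tiers : Int) (out : List (Int × Int)) : Prop := out = generate_positions_diagonal_pattern_alt num_stacks num_tiers
instance (num_stacks : Int) (num_tiers : Int) (out : List (Int × Int)) : Decidable (Spec_generate_positions_diagonal_pattern num_stacks num_tiers out) := by unfold Spec_generate_positions_diagonal_pattern; infer_instance

-- ===== CLAIM (what is proved, stated in full; the proofs are below) =====
def Claim_equal_generate_positions_diagonal_pattern : Prop := ∀ (num_stacks : Int) (num_tiers : Int), Dom_generate_positions_diagonal_pattern num_stacks num_tiers → Spec_generate_positions_diagonal_pattern num_stacks num_tiers (generate_positions_diagonal_pattern num_stacks num_tiers)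

-- ===== LEMMAS AND PROOFS =====

-- A's output in closed diagonal form: for each anti-diagonal sum s, the cells (x, s-x)
def diagForm (ns nt : Int) : List (Int × Int) :=
  (PySem.List.pyRange 0 (ns + nt - 1) 1).flatMap
    (fun s => (PySem.List.pyRange (max 0 (s - nt + 1)) (min (ns - 1) s + 1) 1).map
      (fun x => (x, s - x)))

def cellsOf (ns nt : Int) : List (Int × Int) :=
  (PySem.List.pyRange 0 ns 1).flatMap
    (fun x => (PySem.List.pyRange 0 nt 1).map (fun y => (x, y)))

theorem flatMap_congr_mem {α β : Type} {l : List α} {f g : α → List β}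
    (h : ∀ x ∈ l, f x = g x) : l.flatMap f = l.flatMap g := by
  induction l with
  | nil => rfl
  | cons a t ih =>
    simp only [List.flatMap_cons]
    rw [h a (by simp), ih (fun x hx => h x (by simp [hx]))]

theorem pyRange_one_shift (a b c : Int) :
    PySem.List.pyRange (a + c) (b + c) 1 = (PySem.List.pyRange a b 1).map (· + c) := by
  rw [PySem.List.pyRange_one, PySem.List.pyRange_one, List.map_map]
  have : b + c - (a + c) = b - a := by ring
  rw [this]
  apply List.map_congr_left
  intro k _
  simp
  ring

theorem whileDiag_eq (ns x y : Int) :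
    whileDiag ns x y
      = (PySem.List.pyRange x (min ns (x + y + 1)) 1).map (fun t => (t, x + y - t)) := by
  by_cases h : 0 ≤ y ∧ x < ns
  · rw [whileDiag, if_pos h, PySem.List.pyRange_one_cons (by omega), List.map_cons]
    have hx : x + y - x = y := by ring
    rw [hx]
    have ih := whileDiag_eq ns (x + 1) (y - 1)
    have h1 : x + 1 + (y - 1) + 1 = x + y + 1 := by ring
    have h2 : x + 1 + (y - 1) = x + y := by ring
    rw [ih, h1, h2]
  · rw [whileDiag, if_neg h, PySem.List.pyRange_one_eq_nil (by omega), List.map_nil]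
termination_by (y + 1).toNat
decreasing_by omega

theorem portA_eq (ns nt : Int) :
    generate_positions_diagonal_pattern ns nt
      = (PySem.List.pyRange 0 nt 1).flatMap (fun st => whileDiag ns 0 st)
        ++ (PySem.List.pyRange 1 ns 1).flatMap (fun st => whileDiag ns st (nt - 1)) := by
  unfold generate_positions_diagonal_pattern
  rw [PySem.List.foldl_append_eq_flatMap, PySem.List.foldl_append_eq_flatMap]
  simp

theorem A_eq_diagForm (ns nt : Int) :
    generate_positions_diagonal_pattern ns nt = diagForm ns nt := by
  rw [portA_eq]
  unfold diagForm
  by_cases hns : ns ≤ 0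
  · have hA1 : (PySem.List.pyRange 0 nt 1).flatMap (fun st => whileDiag ns 0 st) = [] := by
      rw [flatMap_congr_mem (g := fun _ => []) ?_]
      · simp
      · intro s _
        rw [whileDiag_eq, PySem.List.pyRange_one_eq_nil (by omega), List.map_nil]
    have hA2 : PySem.List.pyRange 1 ns 1 = [] := PySem.List.pyRange_one_eq_nil (by omega)
    have hB : (PySem.List.pyRange 0 (ns + nt - 1) 1).flatMap
        (fun s => (PySem.List.pyRange (max 0 (s - nt + 1)) (min (ns - 1) s + 1) 1).map
          (fun x => (x, s - x))) = [] := by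
      rw [flatMap_congr_mem (g := fun _ => []) ?_]
      · simp
      · intro s hs
        have := (PySem.List.mem_pyRange_one.mp hs).1
        rw [PySem.List.pyRange_one_eq_nil (by omega), List.map_nil]
    rw [hA1, hA2, hB]; simp
  · by_cases hnt : nt ≤ 0
    · have hA1 : PySem.List.pyRange 0 nt 1 = [] := PySem.List.pyRange_one_eq_nil (by omega)
      have hA2 : (PySem.List.pyRange 1 ns 1).flatMap (fun st => whileDiag ns st (nt - 1)) = [] := by
        rw [flatMap_congr_mem (g := fun _ => []) ?_]
        · simp
        · intro st _
          rw [whileDiag_eq, PySem.List.pyRange_one_eq_nil (by omega), List.map_nil]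
      have hB : (PySem.List.pyRange 0 (ns + nt - 1) 1).flatMap
          (fun s => (PySem.List.pyRange (max 0 (s - nt + 1)) (min (ns - 1) s + 1) 1).map
            (fun x => (x, s - x))) = [] := by
        rw [flatMap_congr_mem (g := fun _ => []) ?_]
        · simp
        · intro s hs
          have := (PySem.List.mem_pyRange_one.mp hs).1
          rw [PySem.List.pyRange_one_eq_nil (by omega), List.map_nil]
      rw [hA1, hA2, hB]; simp
    · rw [PySem.List.pyRange_one_append 0 nt (ns + nt - 1) (by omega) (by omega),
        List.flatMap_append]
      congr 1
      · apply Eq.symm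
        apply flatMap_congr_mem
        intro s hs
        obtain ⟨h0, h1⟩ := PySem.List.mem_pyRange_one.mp hs
        rw [whileDiag_eq]
        have e1 : max 0 (s - nt + 1) = 0 := by omega
        have e2 : min (ns - 1) s + 1 = min ns (0 + s + 1) := by omega
        rw [e1, e2]
        apply List.map_congr_left
        intro t _
        rw [zero_add]
      · have hr : PySem.List.pyRange nt (ns + nt - 1) 1
            = (PySem.List.pyRange 1 ns 1).map (· + (nt - 1)) := by
          have h := pyRange_one_shift 1 ns (nt - 1)
          have e1 : (1 : Int) + (nt - 1) = nt := by ring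
          have e2 : ns + (nt - 1) = ns + nt - 1 := by ring
          rw [e1, e2] at h
          exact h
        rw [hr, List.flatMap_map]
        apply Eq.symm
        apply flatMap_congr_mem
        intro st hst
        obtain ⟨h1, h2⟩ := PySem.List.mem_pyRange_one.mp hst
        rw [whileDiag_eq]
        have e1 : max 0 (st + (nt - 1) - nt + 1) = st := by omega
        have e2 : min (ns - 1) (st + (nt - 1)) + 1 = min ns (st + (nt - 1) + 1) := by omega
        rw [e1, e2]

-- strict pairwise increase of pyRange with step 1
theorem pyRange_one_pairwise_lt (a b : Int) :
    (PySem.List.pyRange a b 1).Pairwise (· < ·) := by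
  rw [PySem.List.pyRange_one, List.pairwise_map]
  exact List.pairwise_lt_range.imp (fun h => by omega)

-- membership in diagForm
theorem mem_diagForm (ns nt : Int) (p : Int × Int) :
    p ∈ diagForm ns nt ↔ 0 ≤ p.1 ∧ p.1 < ns ∧ 0 ≤ p.2 ∧ p.2 < nt := by
  unfold diagForm
  simp only [List.mem_flatMap, List.mem_map, PySem.List.mem_pyRange_one]
  constructor
  · rintro ⟨s, ⟨hs0, hs1⟩, x, ⟨hx0, hx1⟩, rfl⟩
    dsimp only
    omega
  · rintro ⟨h1, h2, h3, h4⟩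
    refine ⟨p.1 + p.2, by omega, p.1, by omega, ?_⟩
    have : p.1 + p.2 - p.1 = p.2 := by ring
    rw [this]

theorem mem_cellsOf (ns nt : Int) (p : Int × Int) :
    p ∈ cellsOf ns nt ↔ 0 ≤ p.1 ∧ p.1 < ns ∧ 0 ≤ p.2 ∧ p.2 < nt := by
  unfold cellsOf
  simp only [List.mem_flatMap, List.mem_map, PySem.List.mem_pyRange_one]
  constructor
  · rintro ⟨x, ⟨hx0, hx1⟩, y, ⟨hy0, hy1⟩, rfl⟩
    exact ⟨hx0, hx1, hy0, hy1⟩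
  · rintro ⟨h1, h2, h3, h4⟩
    exact ⟨p.1, ⟨h1, h2⟩, p.2, ⟨h3, h4⟩, rfl⟩

-- diagForm is strictly increasing in the scalar rank key
theorem diagForm_pairwise (ns nt : Int) :
    (diagForm ns nt).Pairwise
      (fun a b => (a.1 + a.2) * ns + a.1 < (b.1 + b.2) * ns + b.1) := by
  unfold diagForm
  rw [List.pairwise_flatMap]
  constructor
  · intro s _
    rw [List.pairwise_map]
    refine (pyRange_one_pairwise_lt _ _).imp ?_
    intro x y h
    dsimp only
    have e1 : x + (s - x) = s := by ring
    have e2 : y + (s - y) = s := by ring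
    rw [e1, e2]
    have hxy : x < y := h
    linarith
  · refine List.Pairwise.imp_of_mem ?_ (pyRange_one_pairwise_lt _ _)
    intro s1 s2 hs1 hs2 hlt p hp q hq
    simp only [List.mem_map, PySem.List.mem_pyRange_one] at hp hq
    obtain ⟨x1, ⟨hx1a, hx1b⟩, rfl⟩ := hp
    obtain ⟨x2, ⟨hx2a, hx2b⟩, rfl⟩ := hq
    dsimp only
    have e1 : x1 + (s1 - x1) = s1 := by ring
    have e2 : x2 + (s2 - x2) = s2 := by ring
    rw [e1, e2]
    have hA : 0 ≤ x1 := by omega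
    have hB : x1 ≤ ns - 1 := by omega
    have hC : 0 ≤ x2 := by omega
    have hns : 1 ≤ ns := by omega
    have h1 : 1 * ns ≤ (s2 - s1) * ns :=
      mul_le_mul_of_nonneg_right (by omega) (by omega)
    nlinarith [h1]

theorem diagForm_nodup (ns nt : Int) : (diagForm ns nt).Nodup := by
  have h := diagForm_pairwise ns nt
  exact h.imp (fun {a b} hab => by intro he; rw [he] at hab; omega)

theorem pyRange_one_nodup (a b : Int) : (PySem.List.pyRange a b 1).Nodup :=
  (pyRange_one_pairwise_lt a b).imp (fun h => Int.ne_of_lt h)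

theorem cellsOf_nodup (ns nt : Int) : (cellsOf ns nt).Nodup := by
  unfold cellsOf
  rw [List.nodup_flatMap]
  constructor
  · intro x _
    exact (pyRange_one_nodup 0 nt).map
      (fun y1 y2 h => by simpa using congrArg Prod.snd h)
  · refine List.Pairwise.imp_of_mem ?_ (pyRange_one_pairwise_lt 0 ns)
    intro x1 x2 _ _ hlt p hp hq
    simp only [List.mem_map] at hp hq
    obtain ⟨y1, _, rfl⟩ := hp
    obtain ⟨y2, _, he⟩ := hq
    rw [Prod.mk.injEq] at he
    omega

theorem diagForm_perm_cells (ns nt : Int) : (diagForm ns nt).Perm (cellsOf ns nt) := by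
  apply List.perm_of_nodup_nodup_toFinset_eq (diagForm_nodup ns nt) (cellsOf_nodup ns nt)
  ext p
  simp only [List.mem_toFinset, mem_diagForm, mem_cellsOf]

theorem main_eq (ns nt : Int) :
    generate_positions_diagonal_pattern ns nt = generate_positions_diagonal_pattern_alt ns nt := by
  rw [A_eq_diagForm]
  unfold generate_positions_diagonal_pattern_alt
  exact (PySem.List.sorted_eq_of_perm_of_pairwise_lt _ _ _
    (diagForm_perm_cells ns nt) (diagForm_pairwise ns nt)).symm

-- ===== VERDICT (by name: the statement is the Claim_ definition above) =====
theorem generate_positions_diagonal_pattern_spec : Claim_equal_generate_positions_diagonal_pattern := by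
  intro ns nt _
  exact main_eq ns nt
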